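-- pv_equiv track=rewrite | github.com/bugoverdose/examples | algorithms/programmers/bruteforce/mockexam/solution.py | solution
-- ===== SOURCE A (Python) =====
-- def solution(answers):
--     A = [1, 2, 3, 4, 5]
--     B = [2, 1, 2, 3, 2, 4, 2, 5]
--     C = [3, 3, 1, 1, 2, 2, 4, 4, 5, 5]
--     scores = [0, 0, 0]
--     for i in range(len(answers)):
--         answer = answers[i]
--         scores[0] += A[i % len(A)] == answer
--         scores[1] += B[i % len(B)] == answer
--         scores[2] += C[i % len(C)] == answer
--
--     max_score = max(scores)
--     answer = []
--     for i in range(3):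
--         if scores[i] == max_score:
--             answer.append(i+1)
--     return answer
-- ===== SOURCE B (Python) =====
-- def solution(answers):
--     # Tile each pattern to the common period 40, then walk the answers in
--     # blocks of 40, counting matches of each block against each tile with
--     # zip -- no per-element modulo indexing at all.
--     base = ([1, 2, 3, 4, 5],
--             [2, 1, 2, 3, 2, 4, 2, 5],
--             [3, 3, 1, 1, 2, 2, 4, 4, 5, 5])
--     tiles = [p * (40 // len(p)) for p in base]
--     scores = [0, 0, 0]
--     i = 0
--     while i < len(answers):
--         chunk = answers[i:i + 40]
--         for k in range(3):
--             scores[k] += sum(p == a for p, a in zip(tiles[k], chunk))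
--         i += 40
--     best = max(scores)
--     return [k + 1 for k in range(3) if scores[k] == best]
-- ===== Notes on version B (the rewrite author's own statement) =====
-- stated objective: alternative
-- what changed: B removes all per-element modulo indexing: it tiles the three patterns to their common period 40 and scans the answers in 40-element blocks, counting matches of each block against each tile with zip, then picks the winners from the scores list.
import Mathlib
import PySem

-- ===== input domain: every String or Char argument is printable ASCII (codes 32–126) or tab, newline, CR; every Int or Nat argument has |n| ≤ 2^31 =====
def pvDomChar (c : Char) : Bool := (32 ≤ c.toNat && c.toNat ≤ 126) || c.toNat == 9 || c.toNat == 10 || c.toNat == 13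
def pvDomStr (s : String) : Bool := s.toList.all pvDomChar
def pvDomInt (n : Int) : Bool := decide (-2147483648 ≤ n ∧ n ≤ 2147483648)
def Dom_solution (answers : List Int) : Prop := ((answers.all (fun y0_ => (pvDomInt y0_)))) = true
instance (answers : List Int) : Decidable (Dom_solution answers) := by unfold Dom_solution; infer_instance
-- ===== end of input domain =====

-- B replaces A's per-element modulo indexing by tiling the patterns to their common
-- period 40 and consuming the answers in 40-blocks with zip (objective: alternative).

-- ===== PORT A =====
def pvPatA : List Int := [1, 2, 3, 4, 5]
def pvPatB : List Int := [2, 1, 2, 3, 2, 4, 2, 5]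
def pvPatC : List Int := [3, 3, 1, 1, 2, 2, 4, 4, 5, 5]

-- the 'for i in range(len(answers))' loop: recursion over the remaining answers with index i
def pvLoopA (i : Nat) (s : Int × Int × Int) (rest : List Int) : Int × Int × Int :=
  match rest with
  | [] => s
  | answer :: r =>
      pvLoopA (i + 1)
        (s.1 + (if PySem.List.pyGetD pvPatA ((i : Int) % 5) 0 = answer then 1 else 0),
         s.2.1 + (if PySem.List.pyGetD pvPatB ((i : Int) % 8) 0 = answer then 1 else 0),
         s.2.2 + (if PySem.List.pyGetD pvPatC ((i : Int) % 10) 0 = answer then 1 else 0)) r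

def solution (answers : List Int) : List Int :=
  let s := pvLoopA 0 (0, 0, 0) answers
  let maxScore := (PySem.List.max? [s.1, s.2.1, s.2.2] (fun x => x)).getD 0
  ((if s.1 = maxScore then [(1 : Int)] else []) ++
    (if s.2.1 = maxScore then [2] else [])) ++
    (if s.2.2 = maxScore then [3] else [])

-- ===== PORT B =====
-- tiles = [p * (40 // len(p)) for p in base]
def pvTileA : List Int := (List.replicate 8 [1, 2, 3, 4, 5]).flatten
def pvTileB : List Int := (List.replicate 5 [2, 1, 2, 3, 2, 4, 2, 5]).flatten
def pvTileC : List Int := (List.replicate 4 [3, 3, 1, 1, 2, 2, 4, 4, 5, 5]).flatten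

-- sum(p == a for p, a in zip(tile, chunk))
def pvZipCount (tile chunk : List Int) : Int :=
  ((tile.zip chunk).map (fun pa => if pa.1 = pa.2 then (1 : Int) else 0)).sum

-- the 'while rest:' loop, taking a 40-block each round
def pvLoopB (s : Int × Int × Int) (rest : List Int) : Int × Int × Int :=
  match rest with
  | [] => s
  | a :: r =>
      pvLoopB
        (s.1 + pvZipCount pvTileA ((a :: r).take 40),
         s.2.1 + pvZipCount pvTileB ((a :: r).take 40),
         s.2.2 + pvZipCount pvTileC ((a :: r).take 40)) ((a :: r).drop 40)
  termination_by rest.length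
  decreasing_by simp [List.length_drop]

def solution_alt (answers : List Int) : List Int :=
  let s := pvLoopB (0, 0, 0) answers
  let scores : List Int := [s.1, s.2.1, s.2.2]
  let best := (PySem.List.max? scores (fun x => x)).getD 0
  (List.range 3).filterMap
    (fun k => if PySem.List.pyGetD scores (k : Int) 0 = best then some ((k : Int) + 1) else none)

-- ===== PRECONDITION & SPEC =====
def Spec_solution (answers : List Int) (out : List Int) : Prop := out = solution_alt answers
instance (answers : List Int) (out : List Int) : Decidable (Spec_solution answers out) := by unfold Spec_solution; infer_instance

-- ===== CLAIM (what is proved, stated in full; the proofs are below) =====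
def Claim_equal_solution : Prop := ∀ (answers : List Int), Dom_solution answers → Spec_solution answers (solution answers)

-- ===== LEMMAS AND PROOFS =====

-- within one period: position j < 40 reads the same value from the pattern (via mod) and the tile
lemma pvTile_lookup : ∀ j : Nat, j < 40 →
    PySem.List.pyGetD pvPatA ((j : Int) % 5) 0 = pvTileA[j]! ∧
    PySem.List.pyGetD pvPatB ((j : Int) % 8) 0 = pvTileB[j]! ∧
    PySem.List.pyGetD pvPatC ((j : Int) % 10) 0 = pvTileC[j]! := by
  decide

lemma pvLoopA_append (c r : List Int) : ∀ (i : Nat) (s : Int × Int × Int),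
    pvLoopA i s (c ++ r) = pvLoopA (i + c.length) (pvLoopA i s c) r := by
  induction c with
  | nil => intro i s; simp [pvLoopA]
  | cons a c ih =>
      intro i s
      simp only [List.cons_append, pvLoopA, ih, List.length_cons]
      ring_nf

lemma pvZipCount_cons (x a : Int) (t c : List Int) :
    pvZipCount (x :: t) (a :: c) = (if x = a then 1 else 0) + pvZipCount t c := by
  simp [pvZipCount]

lemma pvChunk_eq (c : List Int) : ∀ (j q : Nat) (s : Int × Int × Int),
    c.length + j ≤ 40 →
    pvLoopA (40 * q + j) s c =
      (s.1 + pvZipCount (pvTileA.drop j) c,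
       s.2.1 + pvZipCount (pvTileB.drop j) c,
       s.2.2 + pvZipCount (pvTileC.drop j) c) := by
  induction c with
  | nil => intro j q s _; simp [pvLoopA, pvZipCount]
  | cons a c ih =>
      intro j q s h
      have hj : j < 40 := by simp at h; omega
      have h5 : (((40 * q + j : Nat) : Int)) % 5 = (j : Int) % 5 := by push_cast; omega
      have h8 : (((40 * q + j : Nat) : Int)) % 8 = (j : Int) % 8 := by push_cast; omega
      have h10 : (((40 * q + j : Nat) : Int)) % 10 = (j : Int) % 10 := by push_cast; omega
      obtain ⟨t1, t2, t3⟩ := pvTile_lookup j hj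
      have d1 : pvTileA.drop j = pvTileA[j]! :: pvTileA.drop (j + 1) := by
        rw [List.drop_eq_getElem_cons (by simp [pvTileA]; omega),
            getElem!_pos pvTileA j (by simp [pvTileA]; omega)]
      have d2 : pvTileB.drop j = pvTileB[j]! :: pvTileB.drop (j + 1) := by
        rw [List.drop_eq_getElem_cons (by simp [pvTileB]; omega),
            getElem!_pos pvTileB j (by simp [pvTileB]; omega)]
      have d3 : pvTileC.drop j = pvTileC[j]! :: pvTileC.drop (j + 1) := by
        rw [List.drop_eq_getElem_cons (by simp [pvTileC]; omega),
            getElem!_pos pvTileC j (by simp [pvTileC]; omega)]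
      simp only [pvLoopA, h5, h8, h10, t1, t2, t3]
      rw [show 40 * q + j + 1 = 40 * q + (j + 1) by omega,
          ih (j + 1) q _ (by simp at h ⊢; omega)]
      simp only [d1, d2, d3, pvZipCount_cons]
      refine Prod.ext ?_ (Prod.ext ?_ ?_) <;> simp <;> ring

lemma pvLoopB_eq : ∀ (n : Nat) (answers : List Int), answers.length ≤ n → ∀ (q : Nat) (s : Int × Int × Int),
    pvLoopA (40 * q) s answers = pvLoopB s answers := by
  intro n
  induction n with
  | zero =>
      intro answers h q s
      have : answers = [] := by cases answers <;> simp_all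
      subst this
      rw [pvLoopB]
      simp [pvLoopA]
  | succ n ih =>
      intro answers h q s
      cases answers with
      | nil => rw [pvLoopB]; simp [pvLoopA]
      | cons a r =>
          have hc := pvChunk_eq ((a :: r).take 40) 0 q s (by simp [List.length_take])
          rw [Nat.add_zero] at hc
          simp only [List.drop_zero] at hc
          rw [show pvLoopA (40 * q) s (a :: r)
                = pvLoopA (40 * q) s ((a :: r).take 40 ++ (a :: r).drop 40) by
                  rw [List.take_append_drop],
              pvLoopA_append, hc]
          conv_rhs => rw [pvLoopB]
          rcases hd : (a :: r).drop 40 with _ | ⟨b, t⟩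
          · rw [pvLoopB]
            simp [pvLoopA]
          · have hlen : 40 ≤ r.length := by
              by_contra hcon
              have : (a :: r).drop 40 = [] := List.drop_eq_nil_of_le (by simp; omega)
              simp [this] at hd
            have htk : ((a :: r).take 40).length = 40 := by
              simp [List.length_take]; omega
            have hbt : (b :: t).length ≤ n := by
              have := congrArg List.length hd
              simp at this h ⊢
              omega
            rw [htk, show 40 * q + 40 = 40 * (q + 1) by ring, ih (b :: t) hbt (q + 1)]

lemma pvBuild_eq (s1 s2 s3 m : Int) :
    ((if s1 = m then [(1 : Int)] else []) ++ (if s2 = m then [2] else [])) ++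
        (if s3 = m then [3] else []) =
      (List.range 3).filterMap
        (fun k => if PySem.List.pyGetD [s1, s2, s3] (k : Int) 0 = m then some ((k : Int) + 1) else none) := by
  simp [List.range, List.range.loop, List.filterMap, PySem.List.pyGetD, PySem.List.pyGet?, PySem.List.pyIdx?]
  split_ifs <;> rfl

theorem solution_spec : Claim_equal_solution := by
  intro answers _
  show solution answers = solution_alt answers
  unfold solution solution_alt
  rw [show pvLoopA 0 = pvLoopA (40 * 0) from rfl,
      pvLoopB_eq answers.length answers le_rfl 0]
  exact pvBuild_eq _ _ _ _
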